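-- pv_equiv track=rewrite | github.com/MidwestJohn/line-lead-qsr-assistant | backend/services/response_processor.py | _infer_procedure_type
-- ===== SOURCE A (Python) =====
-- def _infer_procedure_type(text: str) -> str:
--     """Infer procedure type from text content"""
--     text_lower = text.lower()
--
--     if any(word in text_lower for word in ['clean', 'wash', 'sanitize', 'disinfect']):
--         return 'cleaning'
--     elif any(word in text_lower for word in ['repair', 'fix', 'maintain', 'service']):
--         return 'maintenance'
--     elif any(word in text_lower for word in ['troubleshoot', 'diagnose', 'solve', 'problem']):
--         return 'troubleshooting'
--     elif any(word in text_lower for word in ['setup', 'install', 'configure', 'initialize']):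
--         return 'setup'
--     elif any(word in text_lower for word in ['safety', 'emergency', 'hazard', 'warning']):
--         return 'safety'
--     else:
--         return 'training'
-- ===== SOURCE B (Python) =====
-- # Single left-to-right scan over the text: at each position, check which keywords
-- # start there and keep the minimum priority seen; index into the label table at the end.
-- _KEYWORD_PRIORITY = {
--     'clean': 0, 'wash': 0, 'sanitize': 0, 'disinfect': 0,
--     'repair': 1, 'fix': 1, 'maintain': 1, 'service': 1,
--     'troubleshoot': 2, 'diagnose': 2, 'solve': 2, 'problem': 2,
--     'setup': 3, 'install': 3, 'configure': 3, 'initialize': 3,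
--     'safety': 4, 'emergency': 4, 'hazard': 4, 'warning': 4,
-- }
-- _LABELS = ['cleaning', 'maintenance', 'troubleshooting', 'setup', 'safety', 'training']
--
-- def _infer_procedure_type(text: str) -> str:
--     t = text.lower()
--     best = 5
--     for i in range(len(t)):
--         for kw, pri in _KEYWORD_PRIORITY.items():
--             if pri < best and t.startswith(kw, i):
--                 best = pri
--     return _LABELS[best]
-- ===== Notes on version B (the rewrite author's own statement) =====
-- stated objective: alternative
-- what changed: Instead of five staged any-substring scans, B does a single left-to-right scan over the character positions of the lowered text, checking at each position which keywords start there via startswith and keeping the minimum priority seen, then indexes a label table with that minimum.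
import Mathlib
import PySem

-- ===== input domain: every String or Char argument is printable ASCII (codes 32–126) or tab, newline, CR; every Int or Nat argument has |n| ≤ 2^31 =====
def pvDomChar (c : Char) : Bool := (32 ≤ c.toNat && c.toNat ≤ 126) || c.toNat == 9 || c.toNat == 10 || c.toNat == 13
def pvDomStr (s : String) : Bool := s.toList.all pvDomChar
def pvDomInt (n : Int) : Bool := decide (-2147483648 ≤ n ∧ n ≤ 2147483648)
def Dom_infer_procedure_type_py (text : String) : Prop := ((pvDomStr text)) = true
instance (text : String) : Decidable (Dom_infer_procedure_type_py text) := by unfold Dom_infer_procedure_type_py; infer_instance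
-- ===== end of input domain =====

-- B classifies by one positional scan keeping the minimum matched keyword priority (alternative algorithm, same cost).


-- ===== PORT A =====
def infer_procedure_type_py (text : String) : String :=
  let text_lower := PySem.Str.lower text
  if ["clean", "wash", "sanitize", "disinfect"].any (fun word => PySem.Str.isIn word text_lower) then
    "cleaning"
  else if ["repair", "fix", "maintain", "service"].any (fun word => PySem.Str.isIn word text_lower) then
    "maintenance"
  else if ["troubleshoot", "diagnose", "solve", "problem"].any (fun word => PySem.Str.isIn word text_lower) then
    "troubleshooting"
  else if ["setup", "install", "configure", "initialize"].any (fun word => PySem.Str.isIn word text_lower) then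
    "setup"
  else if ["safety", "emergency", "hazard", "warning"].any (fun word => PySem.Str.isIn word text_lower) then
    "safety"
  else
    "training"

-- ===== PORT B =====
def pvKeywordPri : List (String × Nat) :=
  [("clean", 0), ("wash", 0), ("sanitize", 0), ("disinfect", 0),
   ("repair", 1), ("fix", 1), ("maintain", 1), ("service", 1),
   ("troubleshoot", 2), ("diagnose", 2), ("solve", 2), ("problem", 2),
   ("setup", 3), ("install", 3), ("configure", 3), ("initialize", 3),
   ("safety", 4), ("emergency", 4), ("hazard", 4), ("warning", 4)]

def pvLabels : List String :=
  ["cleaning", "maintenance", "troubleshooting", "setup", "safety", "training"]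

-- Python's t.startswith(kw, i) for 0 ≤ i is ported exactly as startswith on the list dropped at i.
def infer_procedure_type_py_alt (text : String) : String :=
  let t := (PySem.Str.lower text).toList
  let best := (List.range t.length).foldl (fun best i =>
    pvKeywordPri.foldl (fun b kp =>
      if kp.2 < b && PySem.Chars.startswith (t.drop i) kp.1.toList then kp.2 else b) best) 5
  pvLabels.getD best "training"

-- ===== PRECONDITION & SPEC =====
def Spec_infer_procedure_type_py (text : String) (out : String) : Prop := out = infer_procedure_type_py_alt text
instance (text : String) (out : String) : Decidable (Spec_infer_procedure_type_py text out) := by unfold Spec_infer_procedure_type_py; infer_instance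

-- ===== CLAIM =====
def Claim_equal_infer_procedure_type_py : Prop := ∀ (text : String), Dom_infer_procedure_type_py text → Spec_infer_procedure_type_py text (infer_procedure_type_py text)

-- ===== LEMMAS AND PROOFS =====

-- the flattened list of (position, keyword-entry) pairs the nested fold visits
def pvPairs (t : List Char) : List (Nat × (String × Nat)) :=
  (List.range t.length).flatMap (fun i => pvKeywordPri.map (fun kp => (i, kp)))

def pvStep (t : List Char) (b : Nat) (x : Nat × (String × Nat)) : Nat :=
  if x.2.2 < b && PySem.Chars.startswith (t.drop x.1) x.2.1.toList then x.2.2 else b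

theorem pv_flat_gen (t : List Char) (l : List Nat) :
    ∀ (b : Nat),
    l.foldl (fun best i =>
      pvKeywordPri.foldl (fun b kp =>
        if kp.2 < b && PySem.Chars.startswith (t.drop i) kp.1.toList then kp.2 else b) best) b
    = (l.flatMap (fun i => pvKeywordPri.map (fun kp => (i, kp)))).foldl (pvStep t) b := by
  induction l with
  | nil => intro b; rfl
  | cons i l ih =>
    intro b
    simp only [List.foldl_cons, List.flatMap_cons, List.foldl_append, List.foldl_map, ih]
    rfl

theorem pv_nested_eq_flat (t : List Char) :
    (List.range t.length).foldl (fun best i =>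
      pvKeywordPri.foldl (fun b kp =>
        if kp.2 < b && PySem.Chars.startswith (t.drop i) kp.1.toList then kp.2 else b) best) 5
    = (pvPairs t).foldl (pvStep t) 5 :=
  pv_flat_gen t (List.range t.length) 5

theorem pv_fold_le (t : List Char) :
    ∀ (l : List (Nat × (String × Nat))) (b : Nat), l.foldl (pvStep t) b ≤ b := by
  intro l
  induction l with
  | nil => intro b; exact Nat.le_refl b
  | cons x l ih =>
    intro b
    simp only [List.foldl_cons]
    refine (ih _).trans ?_
    unfold pvStep
    by_cases hlt : x.2.2 < b <;>
      by_cases hm : PySem.Chars.startswith (t.drop x.1) x.2.1.toList = true <;>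
      simp [hlt, hm] <;> omega

theorem pv_fold_wit (t : List Char) :
    ∀ (l : List (Nat × (String × Nat))) (b : Nat), l.foldl (pvStep t) b < b →
      ∃ x ∈ l, PySem.Chars.startswith (t.drop x.1) x.2.1.toList = true ∧ x.2.2 = l.foldl (pvStep t) b := by
  intro l
  induction l with
  | nil => intro b h; exact absurd h (Nat.lt_irrefl b)
  | cons x l ih =>
    intro b h
    simp only [List.foldl_cons] at h ⊢
    by_cases hlt : l.foldl (pvStep t) (pvStep t b x) < pvStep t b x
    · obtain ⟨y, hy, hm, hp⟩ := ih _ hlt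
      exact ⟨y, List.mem_cons_of_mem _ hy, hm, hp⟩
    · have heq : l.foldl (pvStep t) (pvStep t b x) = pvStep t b x :=
        Nat.le_antisymm (pv_fold_le t l _) (Nat.le_of_not_lt hlt)
      rw [heq] at h ⊢
      by_cases hm : PySem.Chars.startswith (t.drop x.1) x.2.1.toList = true
      · by_cases hc : x.2.2 < b
        · exact ⟨x, List.mem_cons_self, hm, by simp [pvStep, hm, hc]⟩
        · exact absurd (by simpa [pvStep, hm, hc] using h) (Nat.lt_irrefl b)
      · exact absurd (by simpa [pvStep, hm] using h) (Nat.lt_irrefl b)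

theorem pv_fold_lb (t : List Char) :
    ∀ (l : List (Nat × (String × Nat))) (b : Nat) (x : Nat × (String × Nat)), x ∈ l →
      PySem.Chars.startswith (t.drop x.1) x.2.1.toList = true → l.foldl (pvStep t) b ≤ x.2.2 := by
  intro l
  induction l with
  | nil => intro b x hx; exact absurd hx (List.not_mem_nil)
  | cons y l ih =>
    intro b x hx hm
    simp only [List.foldl_cons]
    rcases List.mem_cons.mp hx with rfl | hx'
    · refine (pv_fold_le t l _).trans ?_
      by_cases hlt : x.2.2 < b
      · simp [pvStep, hlt, hm]
      · simp [pvStep, hlt, hm]; omega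
    · exact ih _ _ hx' hm

-- a priority group's any-substring test holds iff the flattened scan has a matching pair of that priority
theorem pv_group_iff (t : List Char) (p : Nat) (ws : List String)
    (hmem : ∀ w ∈ ws, (w, p) ∈ pvKeywordPri)
    (hback : ∀ kp ∈ pvKeywordPri, kp.2 = p → kp.1 ∈ ws)
    (hne : ∀ w ∈ ws, w.toList ≠ []) :
    (ws.any (fun w => PySem.Chars.isIn w.toList t) = true) ↔
    ∃ x ∈ pvPairs t, x.2.2 = p ∧ PySem.Chars.startswith (t.drop x.1) x.2.1.toList = true := by
  constructor
  · intro h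
    obtain ⟨w, hw, hin⟩ := List.any_eq_true.mp h
    obtain ⟨j, hj⟩ := (PySem.Chars.exists_prefix_drop_iff_isIn _ _).mpr hin
    have hlen : w.toList.length ≤ (t.drop j).length := hj.length_le
    have hwne : 1 ≤ w.toList.length := by
      cases hwl : w.toList with
      | nil => exact absurd hwl (hne w hw)
      | cons c cs => simp
    have hjlt : j < t.length := by
      simp only [List.length_drop] at hlen; omega
    refine ⟨(j, (w, p)), ?_, rfl, ?_⟩
    · unfold pvPairs
      refine List.mem_flatMap.mpr ⟨j, List.mem_range.mpr hjlt, ?_⟩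
      exact List.mem_map.mpr ⟨(w, p), hmem w hw, rfl⟩
    · exact (PySem.Chars.startswith_iff _ _).mpr hj
  · rintro ⟨⟨i, kp⟩, hx, hp, hm⟩
    have hkp : kp ∈ pvKeywordPri := by
      unfold pvPairs at hx
      obtain ⟨j, _, hmap⟩ := List.mem_flatMap.mp hx
      obtain ⟨kp', hkp', heq⟩ := List.mem_map.mp hmap
      cases heq; exact hkp'
    have hws : kp.1 ∈ ws := hback kp hkp hp
    refine List.any_eq_true.mpr ⟨kp.1, hws, ?_⟩
    exact (PySem.Chars.exists_prefix_drop_iff_isIn _ _).mp ⟨i, (PySem.Chars.startswith_iff _ _).mp hm⟩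

theorem pv_result_eq (t : List Char) :
    (pvPairs t).foldl (pvStep t) 5
    = (if ["clean", "wash", "sanitize", "disinfect"].any (fun w => PySem.Chars.isIn w.toList t) then 0
       else if ["repair", "fix", "maintain", "service"].any (fun w => PySem.Chars.isIn w.toList t) then 1
       else if ["troubleshoot", "diagnose", "solve", "problem"].any (fun w => PySem.Chars.isIn w.toList t) then 2
       else if ["setup", "install", "configure", "initialize"].any (fun w => PySem.Chars.isIn w.toList t) then 3
       else if ["safety", "emergency", "hazard", "warning"].any (fun w => PySem.Chars.isIn w.toList t) then 4
       else 5) := by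
  have g0 := pv_group_iff t 0 ["clean", "wash", "sanitize", "disinfect"] (by decide) (by decide) (by decide)
  have g1 := pv_group_iff t 1 ["repair", "fix", "maintain", "service"] (by decide) (by decide) (by decide)
  have g2 := pv_group_iff t 2 ["troubleshoot", "diagnose", "solve", "problem"] (by decide) (by decide) (by decide)
  have g3 := pv_group_iff t 3 ["setup", "install", "configure", "initialize"] (by decide) (by decide) (by decide)
  have g4 := pv_group_iff t 4 ["safety", "emergency", "hazard", "warning"] (by decide) (by decide) (by decide)
  set r := (pvPairs t).foldl (pvStep t) 5 with hr
  have hr5 : r ≤ 5 := pv_fold_le t _ 5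
  have hwit : r < 5 → ∃ x ∈ pvPairs t, PySem.Chars.startswith (t.drop x.1) x.2.1.toList = true ∧ x.2.2 = r :=
    pv_fold_wit t _ 5
  split_ifs with h0 h1 h2 h3 h4
  · obtain ⟨x, hx, hp, hm⟩ := g0.mp h0
    have := pv_fold_lb t _ 5 x hx hm
    omega
  · obtain ⟨x, hx, hp, hm⟩ := g1.mp h1
    have hub := pv_fold_lb t _ 5 x hx hm
    rcases Nat.lt_or_ge r 1 with hlt | hge
    · obtain ⟨y, hy, hym, hyp⟩ := hwit (by omega)
      exact absurd (g0.mpr ⟨y, hy, by omega, hym⟩) (by simpa using h0)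
    · omega
  · obtain ⟨x, hx, hp, hm⟩ := g2.mp h2
    have hub := pv_fold_lb t _ 5 x hx hm
    rcases Nat.lt_or_ge r 2 with hlt | hge
    · obtain ⟨y, hy, hym, hyp⟩ := hwit (by omega)
      interval_cases r
      · exact absurd (g0.mpr ⟨y, hy, by omega, hym⟩) (by simpa using h0)
      · exact absurd (g1.mpr ⟨y, hy, by omega, hym⟩) (by simpa using h1)
    · omega
  · obtain ⟨x, hx, hp, hm⟩ := g3.mp h3
    have hub := pv_fold_lb t _ 5 x hx hm
    rcases Nat.lt_or_ge r 3 with hlt | hge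
    · obtain ⟨y, hy, hym, hyp⟩ := hwit (by omega)
      interval_cases r
      · exact absurd (g0.mpr ⟨y, hy, by omega, hym⟩) (by simpa using h0)
      · exact absurd (g1.mpr ⟨y, hy, by omega, hym⟩) (by simpa using h1)
      · exact absurd (g2.mpr ⟨y, hy, by omega, hym⟩) (by simpa using h2)
    · omega
  · obtain ⟨x, hx, hp, hm⟩ := g4.mp h4
    have hub := pv_fold_lb t _ 5 x hx hm
    rcases Nat.lt_or_ge r 4 with hlt | hge
    · obtain ⟨y, hy, hym, hyp⟩ := hwit (by omega)
      interval_cases r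
      · exact absurd (g0.mpr ⟨y, hy, by omega, hym⟩) (by simpa using h0)
      · exact absurd (g1.mpr ⟨y, hy, by omega, hym⟩) (by simpa using h1)
      · exact absurd (g2.mpr ⟨y, hy, by omega, hym⟩) (by simpa using h2)
      · exact absurd (g3.mpr ⟨y, hy, by omega, hym⟩) (by simpa using h3)
    · omega
  · rcases Nat.lt_or_ge r 5 with hlt | hge
    · obtain ⟨y, hy, hym, hyp⟩ := hwit hlt
      interval_cases r
      · exact absurd (g0.mpr ⟨y, hy, by omega, hym⟩) (by simpa using h0)
      · exact absurd (g1.mpr ⟨y, hy, by omega, hym⟩) (by simpa using h1)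
      · exact absurd (g2.mpr ⟨y, hy, by omega, hym⟩) (by simpa using h2)
      · exact absurd (g3.mpr ⟨y, hy, by omega, hym⟩) (by simpa using h3)
      · exact absurd (g4.mpr ⟨y, hy, by omega, hym⟩) (by simpa using h4)
    · omega

-- ===== VERDICT =====
theorem infer_procedure_type_py_spec : Claim_equal_infer_procedure_type_py := by
  intro text _
  unfold Spec_infer_procedure_type_py infer_procedure_type_py infer_procedure_type_py_alt
  have hflat := pv_nested_eq_flat ((PySem.Str.lower text).toList)
  have hres := pv_result_eq ((PySem.Str.lower text).toList)
  simp only [PySem.Str.isIn_eq] at *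
  rw [hflat, hres]
  split_ifs <;> rfl
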